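-- pv_equiv track=rewrite | github.com/leozzmc/AetherNet | aether_phase6_runtime/adaptive.py | _apply_balanced
-- ===== SOURCE A (Python) =====
-- from typing import List, Optional
--
-- def _apply_balanced(
--     safe_candidates: List[str],
--     decision_map: dict[str, str],
-- ) -> List[str]:
--     preferred: List[str] = []
--     allowed: List[str] = []
--
--     for link_id in safe_candidates:
--         decision_type = decision_map.get(link_id, "allowed")
--
--         if decision_type == "avoid":
--             continue
--
--         if decision_type == "preferred":
--             preferred.append(link_id)
--         else:
--             allowed.append(link_id)
--
--     return preferred + allowed
-- ===== SOURCE B (Python) =====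
-- from typing import List
--
-- def _apply_balanced(
--     safe_candidates: List[str],
--     decision_map: dict[str, str],
-- ) -> List[str]:
--     filtered = [x for x in safe_candidates
--                 if decision_map.get(x, "allowed") != "avoid"]
--     return sorted(
--         filtered,
--         key=lambda x: 0 if decision_map.get(x, "allowed") == "preferred" else 1,
--     )
-- ===== Notes on version B (the rewrite author's own statement) =====
-- stated objective: idiomatic
-- what changed: Replaces the manual two-accumulator partition loop with a filter of avoided ids followed by a stable sort keyed by preference rank, which reproduces preferred-then-allowed order exactly.
import Mathlib
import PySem

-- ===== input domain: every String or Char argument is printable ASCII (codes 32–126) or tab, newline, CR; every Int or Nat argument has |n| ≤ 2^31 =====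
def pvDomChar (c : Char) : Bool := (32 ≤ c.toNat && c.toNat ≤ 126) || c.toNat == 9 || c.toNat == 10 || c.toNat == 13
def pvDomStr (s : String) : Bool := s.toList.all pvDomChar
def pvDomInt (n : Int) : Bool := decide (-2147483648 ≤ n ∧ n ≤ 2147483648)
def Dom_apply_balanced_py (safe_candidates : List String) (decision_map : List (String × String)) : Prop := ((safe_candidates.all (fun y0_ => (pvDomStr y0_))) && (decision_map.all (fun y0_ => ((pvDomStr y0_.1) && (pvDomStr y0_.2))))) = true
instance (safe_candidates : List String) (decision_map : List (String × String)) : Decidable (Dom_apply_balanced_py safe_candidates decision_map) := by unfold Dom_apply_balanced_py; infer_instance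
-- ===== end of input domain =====

-- B replaces A's manual two-accumulator partition loop by filtering out avoided ids
-- and stably sorting the rest by a 0/1 preference key (idiomatic; return value only).

-- decision_map.get(link_id, "allowed"): first-match lookup in the association list
def pvLookup (dm : List (String × String)) (k : String) : String :=
  ((dm.find? (fun p => p.1 == k)).map (·.2)).getD "allowed"

-- ===== PORT A =====
def apply_balanced_py (safe_candidates : List String) (decision_map : List (String × String)) : List String :=
  let pa := safe_candidates.foldl
    (fun (pa : List String × List String) link_id =>
      let decision_type := pvLookup decision_map link_id
      if decision_type = "avoid" then pa
      else if decision_type = "preferred" then (pa.1 ++ [link_id], pa.2)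
      else (pa.1, pa.2 ++ [link_id]))
    ([], [])
  pa.1 ++ pa.2

-- ===== PORT B =====
-- key=lambda x: 0 if decision_map.get(x, "allowed") == "preferred" else 1
def pvKey (dm : List (String × String)) (x : String) : Int :=
  if pvLookup dm x = "preferred" then 0 else 1

def apply_balanced_py_alt (safe_candidates : List String) (decision_map : List (String × String)) : List String :=
  let filtered := safe_candidates.filter (fun x => pvLookup decision_map x ≠ "avoid")
  PySem.List.sorted filtered (pvKey decision_map) false

-- ===== PRECONDITION & SPEC =====
def Spec_apply_balanced_py (safe_candidates : List String) (decision_map : List (String × String)) (out : List String) : Prop := out = apply_balanced_py_alt safe_candidates decision_map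
instance (safe_candidates : List String) (decision_map : List (String × String)) (out : List String) : Decidable (Spec_apply_balanced_py safe_candidates decision_map out) := by unfold Spec_apply_balanced_py; infer_instance

-- ===== CLAIM (what is proved, stated in full; the proofs are below) =====
def Claim_equal_apply_balanced_py : Prop := ∀ (safe_candidates : List String) (decision_map : List (String × String)), Dom_apply_balanced_py safe_candidates decision_map → Spec_apply_balanced_py safe_candidates decision_map (apply_balanced_py safe_candidates decision_map)

-- ===== LEMMAS AND PROOFS =====

-- insertBy appends at the end when x goes before nothing
theorem insertBy_append_last {α : Type} (before : α → α → Bool) (x : α) :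
    ∀ (l : List α), (∀ z ∈ l, before x z = false) → PySem.List.insertBy before x l = l ++ [x] := by
  intro l
  induction l with
  | nil => intro _; rfl
  | cons y ys ih =>
    intro h
    have hy : before x y = false := h y (List.mem_cons_self)
    simp [PySem.List.insertBy, hy, ih (fun z hz => h z (List.mem_cons_of_mem _ hz))]

-- insertBy inserts exactly between the zeros block and the ones block
theorem insertBy_between {α : Type} (before : α → α → Bool) (x : α) :
    ∀ (zs os : List α), (∀ z ∈ zs, before x z = false) → (∀ o ∈ os, before x o = true) →
      PySem.List.insertBy before x (zs ++ os) = zs ++ x :: os := by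
  intro zs
  induction zs with
  | nil =>
    intro os _ ho
    cases os with
    | nil => rfl
    | cons o os' => simp [PySem.List.insertBy, ho o (List.mem_cons_self)]
  | cons z zs' ih =>
    intro os hz ho
    have h1 : before x z = false := hz z (List.mem_cons_self)
    simp [PySem.List.insertBy, h1, ih os (fun w hw => hz w (List.mem_cons_of_mem _ hw)) ho]

-- stable insertion sort with a {0,1}-valued key is the stable two-way partition
theorem foldl_insertBy_binary (key : String → Int) :
    ∀ (l zs os : List String),
      (∀ z ∈ zs, key z = 0) → (∀ o ∈ os, key o = 1) → (∀ x ∈ l, key x = 0 ∨ key x = 1) →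
      l.foldl (fun acc x => PySem.List.insertBy (fun a b => decide (key a < key b)) x acc) (zs ++ os)
        = (zs ++ l.filter (fun x => decide (key x = 0))) ++ (os ++ l.filter (fun x => decide (key x ≠ 0))) := by
  intro l
  induction l with
  | nil => intro zs os _ _ _; simp
  | cons x rest ih =>
    intro zs os hzs hos hl
    rcases hl x (List.mem_cons_self) with h0 | h1
    · have hstep : PySem.List.insertBy (fun a b => decide (key a < key b)) x (zs ++ os) = zs ++ x :: os := by
        apply insertBy_between
        · intro z hz; simp [hzs z hz, h0]
        · intro o ho; simp [hos o ho, h0]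
      have hz' : ∀ z ∈ zs ++ [x], key z = 0 := by
        intro z hz
        rcases List.mem_append.1 hz with h | h
        · exact hzs z h
        · simp at h; subst h; exact h0
      have := ih (zs ++ [x]) os hz' hos (fun y hy => hl y (List.mem_cons_of_mem _ hy))
      simp only [List.foldl_cons, hstep]
      rw [show zs ++ x :: os = (zs ++ [x]) ++ os by simp] at *
      rw [this]
      simp [h0]
    · have hstep : PySem.List.insertBy (fun a b => decide (key a < key b)) x (zs ++ os) = zs ++ (os ++ [x]) := by
        rw [← List.append_assoc]
        apply insertBy_append_last
        intro z hz
        rcases List.mem_append.1 hz with h | h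
        · simp [hzs z h, h1]
        · simp [hos z h, h1]
      have ho' : ∀ o ∈ os ++ [x], key o = 1 := by
        intro o ho
        rcases List.mem_append.1 ho with h | h
        · exact hos o h
        · simp at h; subst h; exact h1
      have := ih zs (os ++ [x]) hzs ho' (fun y hy => hl y (List.mem_cons_of_mem _ hy))
      simp only [List.foldl_cons, hstep]
      rw [this]
      have : key x ≠ 0 := by omega
      simp [this]

-- A's loop is the stable two-way partition of the non-avoided ids
theorem foldA_partition (dm : List (String × String)) :
    ∀ (l p a : List String),
      l.foldl (fun (pa : List String × List String) link_id =>
        let decision_type := pvLookup dm link_id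
        if decision_type = "avoid" then pa
        else if decision_type = "preferred" then (pa.1 ++ [link_id], pa.2)
        else (pa.1, pa.2 ++ [link_id])) (p, a)
      = (p ++ l.filter (fun x => decide (pvLookup dm x = "preferred")),
         a ++ l.filter (fun x => decide (pvLookup dm x ≠ "avoid" ∧ pvLookup dm x ≠ "preferred"))) := by
  intro l
  induction l with
  | nil => intro p a; simp
  | cons x rest ih =>
    intro p a
    by_cases hav : pvLookup dm x = "avoid"
    · have hpref : ¬ pvLookup dm x = "preferred" := by rw [hav]; decide
      simp [List.foldl_cons, hav, ih]
    · by_cases hpref : pvLookup dm x = "preferred"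
      · simp [List.foldl_cons, hpref, ih]
      · simp [List.foldl_cons, hav, hpref, ih]

-- ===== VERDICT (by name: the statement is the Claim_ definition above) =====
theorem apply_balanced_py_spec : Claim_equal_apply_balanced_py := by
  intro sc dm _
  unfold Spec_apply_balanced_py apply_balanced_py apply_balanced_py_alt
  rw [foldA_partition]
  have hsorted : PySem.List.sorted (sc.filter (fun x => pvLookup dm x ≠ "avoid")) (pvKey dm) false
      = ((sc.filter (fun x => pvLookup dm x ≠ "avoid")).filter (fun x => decide (pvKey dm x = 0)))
        ++ ((sc.filter (fun x => pvLookup dm x ≠ "avoid")).filter (fun x => decide (pvKey dm x ≠ 0))) := by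
    have := foldl_insertBy_binary (pvKey dm) (sc.filter (fun x => pvLookup dm x ≠ "avoid")) [] []
      (by simp) (by simp)
      (by intro x _; unfold pvKey; split <;> simp)
    simpa [PySem.List.sorted] using this
  rw [hsorted, List.filter_filter, List.filter_filter]
  dsimp only
  simp only [List.nil_append]
  congr 1
  · apply List.filter_congr
    intro x _
    by_cases h : pvLookup dm x = "preferred"
    · simp [pvKey, h]
    · simp [pvKey, h]
  · apply List.filter_congr
    intro x _
    by_cases h : pvLookup dm x = "preferred"
    · simp [pvKey, h]
    · simp [pvKey, h]
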